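-- pv_equiv track=rewrite | github.com/OlenaChernucha/QA_DU | du_21_2/du_21_2.py | calculation_tasks_user
-- ===== SOURCE A (Python) =====
-- def calculation_tasks_user(tasks, user_id):
--     tasks_completed = 0
--     tasks_uncompleted = 0
--
--     for task in tasks:
--         if task["userId"] == user_id:
--             if task["completed"]:
--                 tasks_completed += 1
--             else:
--                 tasks_uncompleted += 1
--
--     return tasks_completed, tasks_uncompleted
-- ===== SOURCE B (Python) =====
-- def calculation_tasks_user(tasks, user_id):
--     # Divide and conquer: the two counts are additive over list concatenation,
--     # so split the task list in half, recurse, and add the sub-counts.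
--     n = len(tasks)
--     if n == 0:
--         return 0, 0
--     if n == 1:
--         t = tasks[0]
--         if t["userId"] != user_id:
--             return 0, 0
--         return (1, 0) if t["completed"] else (0, 1)
--     mid = n // 2
--     c1, u1 = calculation_tasks_user(tasks[:mid], user_id)
--     c2, u2 = calculation_tasks_user(tasks[mid:], user_id)
--     return c1 + c2, u1 + u2
-- ===== Notes on version B (the rewrite author's own statement) =====
-- stated objective: alternative
-- what changed: Replaces A's single loop with two running counters by a divide-and-conquer recursion: split the list in half, recurse on each half, and add the sub-counts (correct because the counts are additive over concatenation).
import Mathlib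
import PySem

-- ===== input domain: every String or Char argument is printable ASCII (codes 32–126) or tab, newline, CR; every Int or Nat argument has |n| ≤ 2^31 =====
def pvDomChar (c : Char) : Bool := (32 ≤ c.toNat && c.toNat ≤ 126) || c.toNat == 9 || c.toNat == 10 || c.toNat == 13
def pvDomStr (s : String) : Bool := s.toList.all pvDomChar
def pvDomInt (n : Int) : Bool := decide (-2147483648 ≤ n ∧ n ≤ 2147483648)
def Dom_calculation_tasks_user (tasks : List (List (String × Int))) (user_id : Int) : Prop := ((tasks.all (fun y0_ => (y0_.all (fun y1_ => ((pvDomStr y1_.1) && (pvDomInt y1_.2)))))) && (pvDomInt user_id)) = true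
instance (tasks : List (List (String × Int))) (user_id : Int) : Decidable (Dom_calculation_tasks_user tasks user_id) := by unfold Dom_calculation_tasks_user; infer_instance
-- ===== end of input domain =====

-- B replaces A's one-pass dual-counter loop by a divide-and-conquer recursion
-- (split in half, recurse, add sub-counts) — a genuinely different decomposition, not faster.


-- ===== PORT A =====
-- A: one pass over tasks with two counters (tasks_completed, tasks_uncompleted);
-- ctuStep is the body of A's for-loop, named so the lemmas can refer to it.
def ctuStep (user_id : Int) (cu : Int × Int) (task : List (String × Int)) : Int × Int :=
  match (PySem.Dict.mk task).get? "userId" with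
  | some u =>
      if u == user_id then
        match (PySem.Dict.mk task).get? "completed" with
        | some c => if c ≠ 0 then (cu.1 + 1, cu.2) else (cu.1, cu.2 + 1)
        | none => cu   -- Python raises KeyError here; excluded by Pre_
      else cu
  | none => cu         -- Python raises KeyError here; excluded by Pre_

def calculation_tasks_user (tasks : List (List (String × Int))) (user_id : Int) : Int × Int :=
  tasks.foldl (ctuStep user_id) (0, 0)

-- ===== PORT B =====
-- B: divide and conquer — base cases for length 0/1, otherwise split at n//2,
-- recurse on each half and add the sub-counts componentwise.
def calculation_tasks_user_alt (tasks : List (List (String × Int))) (user_id : Int) : Int × Int :=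
  if tasks.length ≤ 1 then
    match tasks with
    | [] => (0, 0)
    | t :: _ =>
      match (PySem.Dict.mk t).get? "userId" with
      | some v =>
          if v ≠ user_id then (0, 0)
          else match (PySem.Dict.mk t).get? "completed" with
               | some c => if c ≠ 0 then (1, 0) else (0, 1)
               | none => (0, 0)   -- Python raises KeyError here; excluded by Pre_
      | none => (0, 0)            -- Python raises KeyError here; excluded by Pre_
  else
    let mid := tasks.length / 2
    let p1 := calculation_tasks_user_alt (tasks.take mid) user_id
    let p2 := calculation_tasks_user_alt (tasks.drop mid) user_id
    (p1.1 + p2.1, p1.2 + p2.2)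
termination_by tasks.length
decreasing_by
  · simp; omega
  · simp; omega

-- ===== PRECONDITION & SPEC =====
-- Pre_ excludes exactly the inputs on which Python A raises KeyError: a task dict
-- without the "userId" key, or a matching task dict without the "completed" key.
def Pre_calculation_tasks_user (tasks : List (List (String × Int))) (user_id : Int) : Prop :=
  (tasks.all (fun t => (PySem.Dict.mk t).contains "userId"
      && (!((PySem.Dict.mk t).get? "userId" == some user_id)
          || (PySem.Dict.mk t).contains "completed"))) = true
instance (tasks : List (List (String × Int))) (user_id : Int) : Decidable (Pre_calculation_tasks_user tasks user_id) := by unfold Pre_calculation_tasks_user; infer_instance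

def pvWitness_calculation_tasks_user : (List (List (String × Int))) × Int :=
  ([[("userId", 1), ("completed", 1)], [("userId", 1), ("completed", 0)], [("userId", 2), ("completed", 1)]], 1)

def Spec_calculation_tasks_user (tasks : List (List (String × Int))) (user_id : Int) (out : Int × Int) : Prop := out = calculation_tasks_user_alt tasks user_id
instance (tasks : List (List (String × Int))) (user_id : Int) (out : Int × Int) : Decidable (Spec_calculation_tasks_user tasks user_id out) := by unfold Spec_calculation_tasks_user; infer_instance

-- ===== CLAIM (what is proved, stated in full; the proofs are below) =====
def Claim_equal_calculation_tasks_user : Prop := ∀ (tasks : List (List (String × Int))) (user_id : Int), Dom_calculation_tasks_user tasks user_id → Pre_calculation_tasks_user tasks user_id → Spec_calculation_tasks_user tasks user_id (calculation_tasks_user tasks user_id)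

-- ===== LEMMAS AND PROOFS =====

-- One loop step from (c, u) adds the step's contribution from (0, 0) componentwise.
theorem ctuStep_shift (user_id : Int) (t : List (String × Int)) (c u : Int) :
    ctuStep user_id (c, u) t
    = (c + (ctuStep user_id (0, 0) t).1, u + (ctuStep user_id (0, 0) t).2) := by
  unfold ctuStep
  rcases (PySem.Dict.mk t).get? "userId" with _ | v
  · simp
  · simp only []
    by_cases hm : (v == user_id) = true
    · simp only [hm, if_true]
      rcases (PySem.Dict.mk t).get? "completed" with _ | x
      · simp
      · by_cases hx : x ≠ 0 <;> simp [hx]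
    · simp [hm]

-- Shifting A's fold: starting from (c, u) adds the counts from (0, 0) componentwise.
theorem ctu_shift (user_id : Int) (tasks : List (List (String × Int))) :
    ∀ c u : Int,
      tasks.foldl (ctuStep user_id) (c, u)
      = (c + (calculation_tasks_user tasks user_id).1,
         u + (calculation_tasks_user tasks user_id).2) := by
  induction tasks with
  | nil => intro c u; simp [calculation_tasks_user]
  | cons t ts ih =>
    intro c u
    simp only [calculation_tasks_user, List.foldl_cons]
    rw [ctuStep_shift user_id t c u, ctuStep_shift user_id t 0 0, ih, ih]
    apply Prod.ext <;> dsimp only <;> ring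

-- A's counts are additive over concatenation.
theorem ctu_append (user_id : Int) (l r : List (List (String × Int))) :
    calculation_tasks_user (l ++ r) user_id
    = ((calculation_tasks_user l user_id).1 + (calculation_tasks_user r user_id).1,
       (calculation_tasks_user l user_id).2 + (calculation_tasks_user r user_id).2) := by
  conv_lhs => rw [calculation_tasks_user, List.foldl_append]
  rcases hl : calculation_tasks_user l user_id with ⟨c, u⟩
  have hl' : l.foldl (ctuStep user_id) (0, 0) = (c, u) := hl
  rw [hl', ctu_shift user_id r c u]

-- Pre_ restricts to any sublist (by membership).
theorem pre_sub (user_id : Int) (ts sub : List (List (String × Int)))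
    (hsub : ∀ x ∈ sub, x ∈ ts)
    (h : Pre_calculation_tasks_user ts user_id) :
    Pre_calculation_tasks_user sub user_id := by
  unfold Pre_calculation_tasks_user at *
  rw [List.all_eq_true] at *
  exact fun x hx => h x (hsub x hx)

-- Main lemma: B equals A on every list satisfying Pre_ (strong induction on length).
theorem ctu_alt_eq (user_id : Int) :
    ∀ (n : Nat) (ts : List (List (String × Int))), ts.length ≤ n →
      Pre_calculation_tasks_user ts user_id →
      calculation_tasks_user_alt ts user_id = calculation_tasks_user ts user_id := by
  intro n
  induction n with
  | zero =>
    intro ts hlen _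
    have : ts = [] := List.eq_nil_of_length_eq_zero (Nat.le_zero.mp hlen)
    subst this
    simp [calculation_tasks_user_alt, calculation_tasks_user]
  | succ n ih =>
    intro ts hlen hpre
    match hts : ts with
    | [] => simp [calculation_tasks_user_alt, calculation_tasks_user]
    | [t] =>
      unfold Pre_calculation_tasks_user at hpre
      simp only [List.all_cons, List.all_nil, Bool.and_true, Bool.and_eq_true] at hpre
      obtain ⟨hkey, hcomp⟩ := hpre
      rw [calculation_tasks_user_alt]
      simp only [List.length_cons, List.length_nil, Nat.le_refl, if_true]
      unfold calculation_tasks_user ctuStep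
      simp only [List.foldl_cons, List.foldl_nil]
      rcases hu : (PySem.Dict.mk t).get? "userId" with _ | v
      · simp [PySem.Dict.contains_eq_isSome_get?, hu] at hkey
      · simp only []
        by_cases hm : (v == user_id) = true
        · have hv : ¬ v ≠ user_id := by simpa using hm
          have : ∃ x, (PySem.Dict.mk t).get? "completed" = some x := by
            simp [hu, hm, PySem.Dict.contains_eq_isSome_get?, Option.isSome_iff_exists] at hcomp
            exact hcomp
          obtain ⟨x, hx⟩ := this
          rw [hx]
          by_cases hxz : x ≠ 0 <;> simp [hm, hv, hxz]
        · have hv : v ≠ user_id := by simpa using hm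
          simp [hm, hv]
    | t1 :: t2 :: rest =>
      have hlen' : rest.length + 2 ≤ n + 1 := by simpa using hlen
      rw [calculation_tasks_user_alt]
      have hlen2 : ¬ (t1 :: t2 :: rest).length ≤ 1 := by simp
      simp only [hlen2, if_false]
      have htake : ((t1 :: t2 :: rest).take ((t1 :: t2 :: rest).length / 2)).length ≤ n := by
        simp only [List.length_take, List.length_cons]
        omega
      have hdrop : ((t1 :: t2 :: rest).drop ((t1 :: t2 :: rest).length / 2)).length ≤ n := by
        simp only [List.length_drop, List.length_cons]
        omega
      have hpt := pre_sub user_id (t1 :: t2 :: rest)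
        ((t1 :: t2 :: rest).take ((t1 :: t2 :: rest).length / 2))
        (fun x hx => List.mem_of_mem_take hx) hpre
      have hpd := pre_sub user_id (t1 :: t2 :: rest)
        ((t1 :: t2 :: rest).drop ((t1 :: t2 :: rest).length / 2))
        (fun x hx => List.mem_of_mem_drop hx) hpre
      rw [ih _ htake hpt, ih _ hdrop hpd]
      rw [← ctu_append user_id]
      rw [List.take_append_drop]

-- ===== VERDICT (by name: the statement is the Claim_ definition above) =====
theorem calculation_tasks_user_spec : Claim_equal_calculation_tasks_user := by
  intro tasks user_id _ hpre
  unfold Spec_calculation_tasks_user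
  exact (ctu_alt_eq user_id tasks.length tasks (Nat.le_refl _) hpre).symm
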